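-- pv_equiv track=rewrite | github.com/dgoff448/Picture_Encoder | encoder.py | to_base_256
-- ===== SOURCE A (Python) =====
-- def to_base_256(n):
--     result = []
--     while n > 0:
--         result.append(n % 256)
--         n = n // 256
--     if len(result) == 1:
--         result.append(0)
--         result.append(0)
--     elif len(result) == 2:
--         result.append(0)
--     result.reverse()  # because we need the most significant byte first
--     return tuple(result)
-- ===== SOURCE B (Python) =====
-- def to_base_256(n):
--     if n <= 0:
--         return ()
--     L = max(3, (n.bit_length() + 7) // 8)
--     return tuple((n >> (8 * (L - 1 - i))) & 0xFF for i in range(L))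
-- ===== Notes on version B (the rewrite author's own statement) =====
-- stated objective: idiomatic
-- what changed: B computes the padded output length up front from bit_length and extracts bytes most-significant-first with shifts and masks, instead of A's remainder loop that accumulates bytes least-significant-first, appends padding zeros and reverses.
import Mathlib
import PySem

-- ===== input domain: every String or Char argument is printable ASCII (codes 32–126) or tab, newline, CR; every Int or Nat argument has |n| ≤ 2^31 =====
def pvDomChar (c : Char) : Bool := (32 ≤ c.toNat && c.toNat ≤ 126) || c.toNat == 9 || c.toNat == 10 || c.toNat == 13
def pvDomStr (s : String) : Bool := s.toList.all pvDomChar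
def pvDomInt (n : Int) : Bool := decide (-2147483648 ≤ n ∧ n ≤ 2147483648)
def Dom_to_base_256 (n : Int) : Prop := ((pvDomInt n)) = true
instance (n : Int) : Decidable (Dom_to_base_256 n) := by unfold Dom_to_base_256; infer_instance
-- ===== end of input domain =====

-- B computes the padded output length up front from the bit length and extracts bytes
-- most-significant-first by shift-and-mask, instead of A's remainder loop + padding + reverse
-- (objective: idiomatic; same cost).

-- ===== PORT A =====
-- the while loop, building the least-significant-first byte list
def toBase256Loop (n : Int) : List Int :=
  if _h : 0 < n then
    PySem.Int.mod n 256 :: toBase256Loop (PySem.Int.floordiv n 256)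
  else []
termination_by n.toNat
decreasing_by
  rw [PySem.Int.floordiv_eq_ediv_of_pos (by norm_num : (0:Int) < 256)]
  omega

def to_base_256 (n : Int) : List Int :=
  let result := toBase256Loop n
  let result :=
    if result.length = 1 then result ++ [0, 0]
    else if result.length = 2 then result ++ [0]
    else result
  result.reverse

-- ===== PORT B =====
-- Python's n.bit_length() for n > 0 is exactly Nat.size; '>>' and '& 0xFF' on the
-- positive int n are exactly Nat.shiftRight and Nat.land on n.toNat.
def to_base_256_alt (n : Int) : List Int :=
  if n ≤ 0 then []
  else
    let L := max 3 ((Nat.size n.toNat + 7) / 8)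
    (List.range L).map (fun i => (((n.toNat >>> (8 * (L - 1 - i))) &&& 255 : Nat) : Int))

-- ===== PRECONDITION & SPEC =====
def Spec_to_base_256 (n : Int) (out : List Int) : Prop := out = to_base_256_alt n
instance (n : Int) (out : List Int) : Decidable (Spec_to_base_256 n out) := by unfold Spec_to_base_256; infer_instance

-- ===== CLAIM (what is proved, stated in full; the proofs are below) =====
def Claim_equal_to_base_256 : Prop := ∀ (n : Int), Dom_to_base_256 n → Spec_to_base_256 n (to_base_256 n)

-- ===== LEMMAS AND PROOFS =====

-- the base-256 digits of a natural number, least significant first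
def digitsN (m : Nat) : List Nat :=
  if h : m = 0 then [] else m % 256 :: digitsN (m / 256)
termination_by m
decreasing_by exact Nat.div_lt_self (Nat.pos_of_ne_zero h) (by norm_num)

-- the big-endian byte view B produces, over Nat
def bytesN (m L : Nat) : List Nat :=
  (List.range L).map (fun i => (m >>> (8 * (L - 1 - i))) &&& 255)

theorem loop_eq : ∀ (m : Nat) (n : Int), n.toNat = m →
    toBase256Loop n = List.map (fun x : Nat => (x : Int)) (digitsN m) := by
  intro m
  induction m using Nat.strong_induction_on with
  | _ m ih =>
    intro n hn
    rw [toBase256Loop]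
    split
    · rename_i h
      have hm0 : m ≠ 0 := by omega
      have hflo : PySem.Int.floordiv n 256 = (n / 256 : Int) :=
        PySem.Int.floordiv_eq_ediv_of_pos (by norm_num)
      have hmod : PySem.Int.mod n 256 = (n % 256 : Int) :=
        PySem.Int.mod_eq_emod_of_pos (by norm_num)
      rw [digitsN, dif_neg hm0, List.map_cons]
      congr 1
      · rw [hmod]; omega
      · refine ih (m / 256) (Nat.div_lt_self (by omega) (by norm_num)) _ ?_
        rw [hflo]; omega
    · rename_i h
      have : m = 0 := by omega
      subst this
      rw [digitsN]; simp

theorem len_digits : ∀ m : Nat, 0 < m → (digitsN m).length = (Nat.size m + 7) / 8 := by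
  intro m
  induction m using Nat.strong_induction_on with
  | _ m ih =>
    intro hm
    rw [digitsN, dif_neg (by omega)]
    by_cases hsmall : m < 256
    · have h0 : m / 256 = 0 := Nat.div_eq_of_lt hsmall
      have e8 : (2 : Nat) ^ 8 = 256 := by norm_num
      have hs1 : Nat.size m ≤ 8 := Nat.size_le.2 (by rw [e8]; exact hsmall)
      have hs2 : 0 < Nat.size m := Nat.size_pos.2 hm
      have hnil : digitsN (m / 256) = [] := by rw [h0, digitsN]; simp
      rw [hnil]
      simp only [List.length_cons, List.length_nil]
      omega
    · replace hsmall : 256 ≤ m := by omega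
      have hdiv : 0 < m / 256 := Nat.div_pos hsmall (by norm_num)
      have ihm := ih (m / 256) (Nat.div_lt_self hm (by norm_num)) hdiv
      set s := Nat.size m with hs
      have hs9 : 9 ≤ s := by
        have e8 : (2 : Nat) ^ 8 = 256 := by norm_num
        have := Nat.lt_size.2 (show 2 ^ 8 ≤ m by rw [e8]; exact hsmall)
        omega
      have hub : Nat.size (m / 256) ≤ s - 8 := by
        apply Nat.size_le.2
        have hm2 : m < 2 ^ s := Nat.lt_size_self m
        rw [Nat.div_lt_iff_lt_mul (by norm_num)]
        calc m < 2 ^ s := hm2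
          _ = 2 ^ (s - 8) * 256 := by
              rw [show (256 : Nat) = 2 ^ 8 by norm_num, ← pow_add]
              congr 1; omega
      have hlb : s - 9 < Nat.size (m / 256) := by
        apply Nat.lt_size.2
        rw [Nat.le_div_iff_mul_le (by norm_num)]
        calc 2 ^ (s - 9) * 256 = 2 ^ (s - 1) := by
              rw [show (256 : Nat) = 2 ^ 8 by norm_num, ← pow_add]
              congr 1; omega
          _ ≤ m := Nat.lt_size.1 (by omega)
      have : Nat.size (m / 256) = s - 8 := by omega
      simp only [List.length_cons, ihm, this]
      omega

theorem bytesN_zero (L : Nat) : bytesN 0 L = List.replicate L 0 := by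
  simp [bytesN]

theorem bytesN_succ (m L : Nat) : bytesN m (L + 1) = bytesN (m / 256) L ++ [m % 256] := by
  unfold bytesN
  rw [List.range_succ, List.map_append]
  congr 1
  · apply List.map_congr_left
    intro i hi
    have hiL : i < L := List.mem_range.1 hi
    have h1 : 8 * (L + 1 - 1 - i) = 8 + 8 * (L - 1 - i) := by omega
    rw [h1, Nat.shiftRight_add]
    congr 2
    simp [Nat.shiftRight_eq_div_pow]
  · simp [Nat.and_two_pow_sub_one_eq_mod m 8]

theorem bytesN_eq : ∀ (L m : Nat), (digitsN m).length ≤ L →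
    bytesN m L = (digitsN m ++ List.replicate (L - (digitsN m).length) 0).reverse := by
  intro L
  induction L with
  | zero =>
    intro m hm
    have : digitsN m = [] := List.eq_nil_of_length_eq_zero (by omega)
    simp [this, bytesN]
  | succ L ih =>
    intro m hm
    by_cases hm0 : m = 0
    · subst hm0
      rw [bytesN_zero]
      rw [digitsN]
      simp [List.reverse_replicate]
    · have hdig : digitsN m = m % 256 :: digitsN (m / 256) := by rw [digitsN, dif_neg hm0]
      have hlen : (digitsN (m / 256)).length ≤ L := by
        rw [hdig, List.length_cons] at hm; omega
      have hml : (digitsN m).length = (digitsN (m / 256)).length + 1 := by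
        rw [hdig, List.length_cons]
      rw [bytesN_succ, ih (m / 256) hlen, hdig]
      simp only [List.cons_append, List.reverse_cons, List.length_cons]
      rw [show L + 1 - ((digitsN (m / 256)).length + 1)
            = L - (digitsN (m / 256)).length from by omega]

theorem to_base_256_eq_alt (n : Int) : to_base_256 n = to_base_256_alt n := by
  by_cases hn : n ≤ 0
  · have h0 : n.toNat = 0 := by omega
    unfold to_base_256 to_base_256_alt
    rw [loop_eq 0 n h0, if_pos hn, digitsN]
    simp
  · replace hn : 0 < n := by omega
    have hmpos : 0 < n.toNat := by omega
    have hlen : (digitsN n.toNat).length = (Nat.size n.toNat + 7) / 8 := len_digits n.toNat hmpos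
    have hLlen : (digitsN n.toNat).length ≤ max 3 ((Nat.size n.toNat + 7) / 8) := by omega
    have hB : to_base_256_alt n
        = List.map (fun x : Nat => (x : Int)) (bytesN n.toNat (max 3 ((Nat.size n.toNat + 7) / 8))) := by
      unfold to_base_256_alt
      rw [if_neg (by omega)]
      simp [bytesN]
    rw [hB, bytesN_eq _ n.toNat hLlen]
    unfold to_base_256
    rw [loop_eq n.toNat n rfl]
    have hk1 : 1 ≤ (digitsN n.toNat).length := by
      have := Nat.size_pos.2 hmpos
      omega
    simp only [List.length_map]
    by_cases h1 : (digitsN n.toNat).length = 1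
    · rw [if_pos h1]
      have h2 : max 3 ((Nat.size n.toNat + 7) / 8) - (digitsN n.toNat).length = 2 := by omega
      rw [h2]
      simp [List.map_reverse, List.replicate_succ]
    · rw [if_neg h1]
      by_cases h2 : (digitsN n.toNat).length = 2
      · rw [if_pos h2]
        have h3 : max 3 ((Nat.size n.toNat + 7) / 8) - (digitsN n.toNat).length = 1 := by omega
        rw [h3]
        simp [List.map_reverse, List.replicate_succ]
      · rw [if_neg h2]
        have h3 : max 3 ((Nat.size n.toNat + 7) / 8) - (digitsN n.toNat).length = 0 := by omega
        rw [h3]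
        simp [List.map_reverse]

-- ===== VERDICT (by name: the statement is the Claim_ definition above) =====
theorem to_base_256_spec : Claim_equal_to_base_256 := by
  intro n _
  unfold Spec_to_base_256
  exact to_base_256_eq_alt n
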